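-- pv_equiv track=rewrite | github.com/Chavez0296/python | unitTwosessionOne.py | max_audience_performances
-- ===== SOURCE A (Python) =====
-- def max_audience_performances(audiences):
--
--     freq = {}
--
--     for aud in audiences:
--         if aud in freq:
--             freq[aud] += 1
--         else:
--             freq[aud] = 1
--
--     max_aud_val = max(freq.keys())
--     sums = max_aud_val * freq[max_aud_val]
--
--     return sums
--     pass
-- ===== SOURCE B (Python) =====
-- def max_audience_performances(audiences):
--     best = None
--     cnt = 0
--     for aud in audiences:
--         if best is None or aud > best:
--             best, cnt = aud, 1
--         elif aud == best:
--             cnt += 1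
--     return best * cnt
-- ===== Notes on version B (the rewrite author's own statement) =====
-- stated objective: alternative
-- what changed: Replaces A's frequency-dictionary build followed by a max-over-keys query with a single streaming pass that maintains the running maximum and its running count in one accumulator.
import Mathlib
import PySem

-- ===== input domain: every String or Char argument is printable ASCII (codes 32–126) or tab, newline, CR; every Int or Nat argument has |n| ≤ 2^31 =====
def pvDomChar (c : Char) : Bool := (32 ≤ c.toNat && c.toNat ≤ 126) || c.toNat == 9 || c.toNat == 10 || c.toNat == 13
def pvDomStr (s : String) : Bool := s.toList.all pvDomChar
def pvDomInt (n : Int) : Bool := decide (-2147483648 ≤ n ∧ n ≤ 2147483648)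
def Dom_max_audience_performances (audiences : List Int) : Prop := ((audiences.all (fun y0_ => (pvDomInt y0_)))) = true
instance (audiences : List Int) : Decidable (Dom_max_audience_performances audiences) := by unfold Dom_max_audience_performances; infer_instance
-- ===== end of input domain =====

-- B replaces A's frequency-dictionary build + max-over-keys query with one streaming
-- pass maintaining the running maximum and its running count (objective: alternative).

-- ===== PORT A =====
-- freq built key by key: present -> increment, absent -> set to 1
def freqA (audiences : List Int) : PySem.Dict Int Int :=
  audiences.foldl
    (fun d aud => if d.contains aud then d.insert aud (d.getD aud 0 + 1) else d.insert aud 1)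
    PySem.Dict.empty

-- max(freq.keys()) * freq[max]
def max_audience_performances (audiences : List Int) : Int :=
  let freq := freqA audiences
  match PySem.List.max? freq.keys (fun k => k) with
  | some m => m * freq.getD m 0   -- freq[m]: m is a key, so the lookup succeeds; getD is exact here
  | none => 0                      -- unreachable under Pre_ (max() of empty raises ValueError)

-- ===== PORT B =====
-- loop body of Source B: state = (best : Option Int, cnt)
def bStep (s : Option Int × Int) (aud : Int) : Option Int × Int :=
  match s.1 with
  | none => (some aud, 1)
  | some b => if b < aud then (some aud, 1)
              else if aud == b then (some b, s.2 + 1)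
              else s

def max_audience_performances_alt (audiences : List Int) : Int :=
  let st := audiences.foldl bStep (none, 0)
  match st.1 with
  | some b => b * st.2
  | none => 0                      -- unreachable under Pre_ (best is None * 0 raises TypeError)

-- ===== PRECONDITION & SPEC =====
-- Python A raises ValueError (max of empty sequence) on []; everything else returns.
def Pre_max_audience_performances (audiences : List Int) : Prop := audiences ≠ []
instance (audiences : List Int) : Decidable (Pre_max_audience_performances audiences) := by unfold Pre_max_audience_performances; infer_instance
def pvWitness_max_audience_performances : List Int := [3, 1, 3]
def Spec_max_audience_performances (audiences : List Int) (out : Int) : Prop := out = max_audience_performances_alt audiences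
instance (audiences : List Int) (out : Int) : Decidable (Spec_max_audience_performances audiences out) := by unfold Spec_max_audience_performances; infer_instance

-- ===== CLAIM (what is proved, stated in full; the proofs are below) =====
def Claim_equal_max_audience_performances : Prop := ∀ (audiences : List Int), Dom_max_audience_performances audiences → Pre_max_audience_performances audiences → Spec_max_audience_performances audiences (max_audience_performances audiences)

-- ===== LEMMAS AND PROOFS =====

-- A's two insert branches are a single Counter step: when the key is absent, getD is 0.
lemma foldA_eq_counter (audiences : List Int) :
    freqA audiences = PySem.Dict.counter audiences := by
  rw [← PySem.Dict.foldl_insert_getD_add_one_eq_counter]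
  unfold freqA
  apply PySem.List.foldl_congr_mem
  intro d aud _
  by_cases h : d.contains aud = true
  · simp [h]
  · have h0 : d.getD aud 0 = 0 :=
      PySem.Dict.getD_of_not_contains d 0 (by simpa using h)
    simp [h, h0]

-- max over the distinct elements equals max over the list (identity key).
lemma max?_ofList_eq (audiences : List Int) (h : audiences ≠ []) :
    PySem.List.max? (PySem.Set.ofList audiences) (fun k => k) =
    PySem.List.max? audiences (fun x => x) := by
  obtain ⟨x, t, rfl⟩ := List.exists_cons_of_ne_nil h
  have hne : PySem.Set.ofList (x :: t) ≠ [] := by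
    intro hnil
    have : x ∈ PySem.Set.ofList (x :: t) := (PySem.Set.mem_ofList _ _).mpr (List.mem_cons_self ..)
    simp [hnil] at this
  obtain ⟨a, ha⟩ := Option.ne_none_iff_exists'.mp
    (by simpa [PySem.List.max?_eq_none_iff] using hne :
      PySem.List.max? (PySem.Set.ofList (x :: t)) (fun k => k) ≠ none)
  obtain ⟨b, hb⟩ := Option.ne_none_iff_exists'.mp
    (by simp [PySem.List.max?_eq_none_iff] :
      PySem.List.max? (x :: t) (fun x => x) ≠ none)
  have hamem : a ∈ x :: t := by
    have := PySem.List.max?_mem ha; rwa [PySem.Set.mem_ofList] at this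
  have hbmem : b ∈ PySem.Set.ofList (x :: t) := by
    rw [PySem.Set.mem_ofList]; exact PySem.List.max?_mem hb
  have h1 : a ≤ b := PySem.List.max?_isMax hb a hamem
  have h2 : b ≤ a := PySem.List.max?_isMax ha b hbmem
  rw [ha, hb, le_antisymm h1 h2]

-- invariant of B's loop once best is set: best = running max, cnt = its multiplicity so far
lemma bfold_some (t : List Int) : ∀ (b c : Int),
    t.foldl bStep (some b, c) =
      (some (t.foldl max b),
       if b < t.foldl max b then (t.count (t.foldl max b) : Int)
       else c + (t.count b : Int)) := by
  induction t with
  | nil => intro b c; simp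
  | cons a t ih =>
    intro b c
    rcases lt_trichotomy b a with hba | hba | hba
    · -- aud > best: reset to (a, 1)
      have hM := PySem.List.le_foldl_max t a
      have hstep : bStep (some b, c) a = (some a, 1) := by simp [bStep, hba]
      have hmax : max b a = a := max_eq_right hba.le
      rw [List.foldl_cons, hstep, ih a 1, List.foldl_cons, hmax]
      by_cases hlt : a < t.foldl max a
      · have hne : (t.foldl max a) ≠ a := ne_of_gt hlt
        simp [hlt, hba.trans hlt, Ne.symm hne]
      · have heq : t.foldl max a = a := le_antisymm (not_lt.mp hlt) hM.1
        simp [heq, hba, add_comm]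
    · -- aud == best: increment
      subst hba
      have hM := PySem.List.le_foldl_max t b
      have hstep : bStep (some b, c) b = (some b, c + 1) := by simp [bStep]
      have hmax : max b b = b := max_self b
      rw [List.foldl_cons, hstep, ih b (c + 1), List.foldl_cons, hmax]
      by_cases hlt : b < t.foldl max b
      · have hne : (t.foldl max b) ≠ b := ne_of_gt hlt
        simp [hlt, Ne.symm hne]
      · have heq : t.foldl max b = b := le_antisymm (not_lt.mp hlt) hM.1
        simp [heq]
        ring
    · -- aud < best: unchanged
      have hM := PySem.List.le_foldl_max t b
      have hstep : bStep (some b, c) a = (some b, c) := by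
        simp [bStep, not_lt.mpr hba.le, ne_of_lt hba]
      have hmax : max b a = b := max_eq_left hba.le
      rw [List.foldl_cons, hstep, ih b c, List.foldl_cons, hmax]
      have hbM : a < t.foldl max b := hba.trans_le hM.1
      have hne : (t.foldl max b) ≠ a := ne_of_gt hbM
      by_cases hlt : b < t.foldl max b
      · simp [hlt, Ne.symm hne]
      · have heq : t.foldl max b = b := le_antisymm (not_lt.mp hlt) hM.1
        simp [heq, Ne.symm (ne_of_gt hba)]

-- B computes m * count for the list maximum m
lemma alt_eq_max_mul_count (x : Int) (t : List Int) :
    max_audience_performances_alt (x :: t) =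
      (t.foldl max x) * ((x :: t).count (t.foldl max x) : Int) := by
  have hM := PySem.List.le_foldl_max t x
  unfold max_audience_performances_alt
  rw [List.foldl_cons]
  have hstep : bStep (none, 0) x = (some x, 1) := by simp [bStep]
  rw [hstep, bfold_some t x 1]
  by_cases hlt : x < t.foldl max x
  · have hne : (t.foldl max x) ≠ x := ne_of_gt hlt
    simp [hlt, Ne.symm hne]
  · have heq : t.foldl max x = x := le_antisymm (not_lt.mp hlt) hM.1
    simp [heq, add_comm]

-- ===== VERDICT (by name: the statement is the Claim_ definition above) =====
theorem max_audience_performances_spec : Claim_equal_max_audience_performances := by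
  intro audiences _ hpre
  obtain ⟨x, t, rfl⟩ := List.exists_cons_of_ne_nil hpre
  unfold Spec_max_audience_performances max_audience_performances
  simp only [foldA_eq_counter, PySem.Dict.keys_counter,
    max?_ofList_eq (x :: t) (by simp), PySem.List.max?_id_cons]
  rw [alt_eq_max_mul_count, PySem.Dict.getD_counter]
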